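-- pv_equiv track=rewrite | github.com/Onako-Nxasana/python | functions_of_integers_on_cartesian_plane.py | sumax
-- ===== SOURCE A (Python) =====
-- def sumax(n):
--   l = list()
--   for i in range(1, n * 2, 2):
--     while sum(l) < (n ** 2):
--       l.append(i)
--       break
--
--   g = list()
--   while l:
--     for i in range(1, n + 1):
--       g.append(i * l[0])
--       l = l[1:]
--   return sum(g)
-- ===== SOURCE B (Python) =====
-- def sumax(n):
--     # closed form: sum_{i=1..n} i*(2i-1) = n(n+1)(4n-1)/6; empty sum for n <= 0
--     if n <= 0:
--         return 0
--     return n * (n + 1) * (4 * n - 1) // 6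
-- ===== Notes on version B (the rewrite author's own statement) =====
-- stated objective: faster
-- what changed: Replaced the quadratic list-building loops (building the odd list with repeated sum() checks, then consuming it with repeated slicing) by the closed-form polynomial n(n+1)(4n-1)//6 for sum i*(2i-1).
import Mathlib
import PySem

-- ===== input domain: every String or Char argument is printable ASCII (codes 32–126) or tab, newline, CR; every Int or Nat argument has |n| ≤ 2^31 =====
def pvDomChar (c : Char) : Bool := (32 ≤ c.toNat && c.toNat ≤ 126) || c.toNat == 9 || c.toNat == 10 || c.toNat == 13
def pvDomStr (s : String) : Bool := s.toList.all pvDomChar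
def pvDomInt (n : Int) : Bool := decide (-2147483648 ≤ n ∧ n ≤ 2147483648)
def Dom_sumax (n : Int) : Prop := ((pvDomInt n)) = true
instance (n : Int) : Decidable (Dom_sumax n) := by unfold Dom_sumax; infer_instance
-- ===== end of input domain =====

-- B computes sum_{i=1..n} i*(2i-1) by the closed form n(n+1)(4n-1)//6 instead of A's quadratic list loops.

-- ===== PORT A =====
-- the first loop: for i in range(1, n*2, 2): while sum(l) < n**2: l.append(i); break
def sumaxL (n : Int) : List Int :=
  (PySem.List.pyRange 1 (n * 2) 2).foldl
    (fun (l : List Int) i => if l.sum < n ^ 2 then l ++ [i] else l) []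

-- one body of the while loop: for i in range(1, n+1): g.append(i*l[0]); l = l[1:]
-- l[0] is ported as (pyGet? l 0).getD 0: the IndexError branch is unreachable, since the first loop
-- produces exactly n elements and this for-loop consumes exactly n of them.
def sumaxFor (n : Int) (l g : List Int) : List Int × List Int :=
  (PySem.List.pyRange 1 (n + 1) 1).foldl
    (fun (st : List Int × List Int) i =>
      (st.1 ++ [i * (PySem.List.pyGet? st.2 0).getD 0], PySem.List.slice st.2 (some 1) none))
    (g, l)

-- the 'while l:' loop; fuel bounds the iterations (each iteration with a nonempty range strictly
-- shrinks l, so l.length + 1 suffices).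
def sumaxWhile (n : Int) (fuel : Nat) (l g : List Int) : List Int :=
  match fuel with
  | 0 => g
  | fuel + 1 =>
    if l = [] then g
    else
      let st := sumaxFor n l g
      sumaxWhile n fuel st.2 st.1

def sumax (n : Int) : Int :=
  (sumaxWhile n ((sumaxL n).length + 1) (sumaxL n) []).sum

-- ===== PORT B =====
def sumax_alt (n : Int) : Int :=
  if n ≤ 0 then 0 else PySem.Int.floordiv (n * (n + 1) * (4 * n - 1)) 6

-- ===== PRECONDITION & SPEC =====
def Spec_sumax (n : Int) (out : Int) : Prop := out = sumax_alt n
instance (n : Int) (out : Int) : Decidable (Spec_sumax n out) := by unfold Spec_sumax; infer_instance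

-- ===== CLAIM (what is proved, stated in full; the proofs are below) =====
def Claim_equal_sumax : Prop := ∀ (n : Int), Dom_sumax n → Spec_sumax n (sumax n)

-- ===== LEMMAS AND PROOFS =====

-- A's first loop appends every element as long as every proper prefix sum stays below c.
lemma loop1_all (c : Int) (xs : List Int) : ∀ (acc : List Int),
    (∀ j : Nat, j < xs.length → acc.sum + (xs.take j).sum < c) →
    xs.foldl (fun l i => if l.sum < c then l ++ [i] else l) acc = acc ++ xs := by
  induction xs with
  | nil => intro acc _; simp
  | cons x xs ih =>
    intro acc h
    have h0 : acc.sum < c := by simpa using h 0 (by simp)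
    simp only [List.foldl_cons, if_pos h0]
    rw [ih (acc ++ [x]) (fun j hj => by
      have := h (j + 1) (by simpa using Nat.succ_lt_succ hj)
      simpa [add_assoc] using this)]
    simp

-- sum of the first j odd numbers is j²
lemma sum_odds (j : Nat) :
    ((List.range j).map (fun k : Nat => 1 + 2 * (k : Int))).sum = (j : Int) ^ 2 := by
  induction j with
  | zero => simp
  | succ j ih =>
    rw [List.range_succ, List.map_append, List.sum_append, ih]
    simp only [List.map_cons, List.map_nil, List.sum_cons, List.sum_nil]
    push_cast
    ring

-- the for-loop zip-multiplies the range list with l and drops the consumed prefix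
lemma innerfold (is : List Int) : ∀ (l g : List Int), is.length ≤ l.length →
    (is.foldl (fun (st : List Int × List Int) i =>
        (st.1 ++ [i * (PySem.List.pyGet? st.2 0).getD 0], PySem.List.slice st.2 (some 1) none))
      (g, l)) = (g ++ (is.zip l).map (fun p => p.1 * p.2), l.drop is.length) := by
  induction is with
  | nil => intro l g _; simp
  | cons i is ih =>
    intro l g h
    cases l with
    | nil => simp at h
    | cons x l =>
      rw [List.foldl_cons]
      have hstep : ((g, x :: l).1 ++ [i * (PySem.List.pyGet? (g, x :: l).2 0).getD 0],
          PySem.List.slice (g, x :: l).2 (some 1) none) = ((g ++ [i * x], l) : List Int × List Int) := by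
        simp [PySem.List.slice_from_one]
      rw [hstep, ih l (g ++ [i * x]) (by simpa using h)]
      simp
-- closed form for 6 * sum_{k<m} (1+k)(1+2k)
lemma sum_prod (m : Nat) :
    6 * (((List.range m).map (fun k : Nat => (1 + (k : Int)) * (1 + 2 * (k : Int)))).sum)
      = (m : Int) * ((m : Int) + 1) * (4 * (m : Int) - 1) := by
  induction m with
  | zero => simp
  | succ m ih =>
    rw [List.range_succ, List.map_append, List.sum_append]
    simp only [List.map_cons, List.map_nil, List.sum_cons, List.sum_nil]
    push_cast
    push_cast at ih
    linear_combination ih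

-- ===== VERDICT (by name: the statement is the Claim_ definition above) =====
theorem sumax_spec : Claim_equal_sumax := by
  intro n _
  unfold Spec_sumax sumax sumax_alt
  by_cases hn : n ≤ 0
  · -- range(1, 2n, 2) is empty; all loops are vacuous
    have hr : sumaxL n = [] := by
      unfold sumaxL
      rw [PySem.List.pyRange_of_pos 1 (n * 2) (by norm_num)]
      rw [if_neg (by omega)]
      simp
    simp [hr, sumaxWhile, hn]
  · rw [if_neg hn]
    replace hn : 0 < n := by omega
    set m : Nat := n.toNat with hm
    have hmn : (m : Int) = n := Int.toNat_of_nonneg (by omega)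
    set odds : List Int := (List.range m).map (fun k : Nat => 1 + 2 * (k : Int)) with hodds
    have hlen : odds.length = m := by simp [hodds]
    -- the first loop builds all n odd numbers: every proper prefix sum j² stays below n²
    have hl0 : sumaxL n = odds := by
      unfold sumaxL
      rw [PySem.List.pyRange_of_pos 1 (n * 2) (by norm_num), if_pos (by omega)]
      have he : ((n * 2 - 1 + 2 - 1) / 2).toNat = m := by omega
      rw [he, loop1_all]
      · simpa using hodds.symm
      · intro j hj
        simp only [List.length_map, List.length_range] at hj
        rw [← List.map_take, List.take_range, show min j m = j from by omega, sum_odds]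
        have hjm : (j : Int) < n := by omega
        have : (j : Int) ^ 2 < n ^ 2 := by nlinarith [Int.natCast_nonneg j]
        simpa using this
    rw [hl0, hlen]
    have hr1 : PySem.List.pyRange 1 (n + 1) 1 = (List.range m).map (fun k : Nat => 1 + (k : Int)) := by
      rw [PySem.List.pyRange_one]
      have : (n + 1 - 1).toNat = m := by omega
      rw [this]
    have hne : odds ≠ [] := by
      intro h; rw [h] at hlen; simp at hlen; omega
    obtain ⟨m', hm'⟩ : ∃ m', m = m' + 1 := ⟨m - 1, by omega⟩
    -- the while loop: one pass consumes all of odds, the second pass sees [] and stops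
    have hfor : sumaxFor n odds [] =
        (((List.range m).map (fun k : Nat => 1 + (k : Int))).zip odds |>.map (fun p => p.1 * p.2), []) := by
      unfold sumaxFor
      rw [hr1, innerfold _ odds [] (by simp [hlen])]
      simp [hlen]
    have hw : sumaxWhile n (m' + 1 + 1) odds [] =
        (((List.range m).map (fun k : Nat => 1 + (k : Int))).zip odds).map (fun p => p.1 * p.2) := by
      rw [sumaxWhile, if_neg hne, hfor]
      show sumaxWhile n (m' + 1) [] _ = _
      rw [sumaxWhile, if_pos rfl]
    rw [hm', hw]
    -- sum the zipped products and compare with the closed form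
    have hzip : (((List.range m).map (fun k : Nat => 1 + (k : Int))).zip odds).map
        (fun p => p.1 * p.2)
        = (List.range m).map (fun k : Nat => (1 + (k : Int)) * (1 + 2 * (k : Int))) := by
      rw [hodds, List.zip_map']
      simp [Function.comp]
    rw [hzip]
    have h6 := sum_prod m
    rw [hmn] at h6
    rw [PySem.Int.floordiv_eq_ediv_of_pos (by norm_num)]
    omega
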